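-- pv_equiv track=rewrite | github.com/monkeylyf/interviewjam | medium/leetcode_find_and_replace_pattern.py | unifiy
-- ===== SOURCE A (Python) =====
-- def unifiy(s):
--     seen = {}
--     i = 0
--     value = 0
--     for c in s:
--         code = seen.get(c)
--         if code is None:
--             seen[c] = i
--             code = i
--             i += 1
--         value += value * 10 + code
--     return value
-- ===== SOURCE B (Python) =====
-- def unifiy(s):
--     order = list(dict.fromkeys(s))
--     value = 0
--     power = 1
--     for c in reversed(s):
--         value += order.index(c) * power
--         power *= 11
--     return value
-- ===== Notes on version B (the rewrite author's own statement) =====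
-- stated objective: alternative
-- what changed: B first computes the first-occurrence character order with dict.fromkeys, then scans the string right-to-left accumulating order.index(c) * power with an explicit power-of-11 variable, replacing A's single left-to-right loop that grows a char-to-counter dict and folds Horner-style via value += value*10 + code.
import Mathlib
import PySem

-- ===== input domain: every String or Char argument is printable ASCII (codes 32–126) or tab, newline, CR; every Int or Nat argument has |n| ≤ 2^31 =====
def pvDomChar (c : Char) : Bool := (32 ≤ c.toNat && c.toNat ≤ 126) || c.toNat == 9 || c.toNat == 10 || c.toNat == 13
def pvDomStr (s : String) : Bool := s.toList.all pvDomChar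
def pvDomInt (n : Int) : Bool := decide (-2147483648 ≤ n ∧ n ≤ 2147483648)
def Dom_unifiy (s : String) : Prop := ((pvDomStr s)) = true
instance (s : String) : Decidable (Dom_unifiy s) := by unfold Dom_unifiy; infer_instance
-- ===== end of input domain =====

-- B replaces A's single left-to-right loop (incremental char→counter dict fused with a
-- Horner accumulation) by: precompute the first-occurrence order with dict.fromkeys, then
-- scan the string RIGHT-TO-LEFT accumulating order.index(c) * power with power *= 11.

-- ===== PORT A =====
-- one loop, state (seen, i, value); 'value += value*10 + code' kept literally
def unifiyStep (st : PySem.Dict Char Int × Int × Int) (c : Char) :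
    PySem.Dict Char Int × Int × Int :=
  let (seen, i, value) := st
  match seen.get? c with
  | none => (seen.insert c i, i + 1, value + (value * 10 + i))
  | some code => (seen, i, value + (value * 10 + code))

def unifiy (s : String) : Int :=
  (s.toList.foldl unifiyStep (PySem.Dict.empty, 0, 0)).2.2

-- ===== PORT B =====
-- order = list(dict.fromkeys(s)); then reversed scan with explicit power of 11.
-- order.index(c) always succeeds (every char of s occurs in order), so getD 0 is never the default.
def unifiy_alt (s : String) : Int :=
  let order := PySem.List.dedup s.toList
  (s.toList.reverse.foldl
      (fun (st : Int × Int) c =>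
        (st.1 + (((PySem.List.index? order c).getD 0 : Nat) : Int) * st.2, st.2 * 11))
      (0, 1)).1

-- ===== PRECONDITION & SPEC =====
def Spec_unifiy (s : String) (out : Int) : Prop := out = unifiy_alt s
instance (s : String) (out : Int) : Decidable (Spec_unifiy s out) := by unfold Spec_unifiy; infer_instance

-- ===== CLAIM (what is proved, stated in full; the proofs are below) =====
def Claim_equal_unifiy : Prop := ∀ (s : String), Dom_unifiy s → Spec_unifiy s (unifiy s)

-- ===== LEMMAS AND PROOFS =====

-- the code of a char relative to an order list, as B computes it
def idxI (order : List Char) (c : Char) : Int :=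
  (((PySem.List.index? order c).getD 0 : Nat) : Int)

-- dedup grows by at most the new element when extended on the right
theorem dedup_append_singleton (p : List Char) (c : Char) :
    PySem.List.dedup (p ++ [c]) =
      if c ∈ PySem.List.dedup p then PySem.List.dedup p
      else PySem.List.dedup p ++ [c] := by
  simp only [PySem.List.dedup_eq_ofList, PySem.Set.ofList_eq_foldl, List.foldl_append,
    List.foldl_cons, List.foldl_nil, PySem.Set.add, PySem.Set.contains]
  split_ifs with h1 h2 <;> simp_all

-- dedup of an extension is dedup of the prefix plus a tail
theorem dedup_append_exists (p t : List Char) :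
    ∃ t', PySem.List.dedup (p ++ t) = PySem.List.dedup p ++ t' := by
  induction t generalizing p with
  | nil => exact ⟨[], by simp⟩
  | cons c rest ih =>
    obtain ⟨t', ht'⟩ := ih (p ++ [c])
    rw [show p ++ c :: rest = (p ++ [c]) ++ rest by simp] at *
    rw [ht', dedup_append_singleton]
    split
    · exact ⟨t', rfl⟩
    · exact ⟨c :: t', by simp⟩

-- A's loop, started from a dict that tabulates the first-occurrence indices of a prefix p,
-- computes the Horner fold of the codes taken in the full order dedup (p ++ l)
theorem A_loop (l : List Char) :
    ∀ (p : List Char) (seen : PySem.Dict Char Int) (v : Int),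
      (∀ c, seen.get? c =
        (PySem.List.index? (PySem.List.dedup p) c).map (fun n => (n : Int))) →
      (l.foldl unifiyStep (seen, ((PySem.List.dedup p).length : Int), v)).2.2
        = l.foldl (fun a c => a * 11 + idxI (PySem.List.dedup (p ++ l)) c) v := by
  induction l with
  | nil => intro p seen v _; rfl
  | cons c rest ih =>
    intro p seen v hg
    have hsplit : p ++ c :: rest = (p ++ [c]) ++ rest := by simp
    simp only [List.foldl]
    rw [show unifiyStep (seen, ((PySem.List.dedup p).length : Int), v) c
        = (let st := (seen, ((PySem.List.dedup p).length : Int), v);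
           match seen.get? c with
           | none => (st.1.insert c st.2.1, st.2.1 + 1, st.2.2 + (st.2.2 * 10 + st.2.1))
           | some code => (st.1, st.2.1, st.2.2 + (st.2.2 * 10 + code))) from rfl]
    cases hidx : PySem.List.index? (PySem.List.dedup p) c with
    | some n =>
      have hmem : c ∈ PySem.List.dedup p := by
        rw [← PySem.List.index?_isSome_iff (xs := PySem.List.dedup p) (v := c), hidx]; rfl
      have hded : PySem.List.dedup (p ++ [c]) = PySem.List.dedup p := by
        rw [dedup_append_singleton, if_pos hmem]
      have hget : seen.get? c = some ((n : Int)) := by rw [hg c, hidx]; rfl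
      simp only [hget]
      have hidx2 : idxI (PySem.List.dedup (p ++ c :: rest)) c = (n : Int) := by
        obtain ⟨t', ht'⟩ := dedup_append_exists (p ++ [c]) rest
        rw [hsplit, ht', hded, idxI, PySem.List.index?_append_of_mem t' hmem, hidx]
        rfl
      rw [hidx2]
      have := ih (p ++ [c]) seen (v * 11 + (n : Int))
        (by intro c'; rw [hded]; exact hg c')
      rw [hded] at this
      rw [show v + (v * 10 + (n : Int)) = v * 11 + (n : Int) by ring, this, ← hsplit]
    | none =>
      have hnmem : c ∉ PySem.List.dedup p := by
        rw [← PySem.List.index?_eq_none_iff (xs := PySem.List.dedup p) (v := c)]; exact hidx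
      have hded : PySem.List.dedup (p ++ [c]) = PySem.List.dedup p ++ [c] := by
        rw [dedup_append_singleton, if_neg hnmem]
      have hget : seen.get? c = none := by rw [hg c, hidx]; rfl
      simp only [hget]
      have hidxc : PySem.List.index? (PySem.List.dedup (p ++ [c])) c
          = some (PySem.List.dedup p).length := by
        rw [hded]; exact PySem.List.index?_append_singleton_self _ c hnmem
      have hidx2 : idxI (PySem.List.dedup (p ++ c :: rest)) c
          = ((PySem.List.dedup p).length : Int) := by
        obtain ⟨t', ht'⟩ := dedup_append_exists (p ++ [c]) rest
        have hmem' : c ∈ PySem.List.dedup (p ++ [c]) := by rw [hded]; simp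
        rw [hsplit, ht', idxI, PySem.List.index?_append_of_mem t' hmem', hidxc]
        rfl
      rw [hidx2]
      have hg' : ∀ c', (seen.insert c ((PySem.List.dedup p).length : Int)).get? c'
          = (PySem.List.index? (PySem.List.dedup (p ++ [c])) c').map (fun n => (n : Int)) := by
        intro c'
        by_cases hc : c' = c
        · subst hc
          rw [PySem.Dict.get?_insert_self, hidxc]; rfl
        · rw [PySem.Dict.get?_insert_of_ne _ _ hc, hg c', hded]
          by_cases hm : c' ∈ PySem.List.dedup p
          · rw [PySem.List.index?_append_of_mem [c] hm]
          · have hm' : c' ∉ p := fun h => hm ((PySem.List.mem_dedup p c').mpr h)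
            rw [(PySem.List.index?_eq_none_iff _ _).mpr hm,
              (PySem.List.index?_eq_none_iff _ _).mpr (by simp [hm', hc])]
      have hlen : ((PySem.List.dedup (p ++ [c])).length : Int)
          = ((PySem.List.dedup p).length : Int) + 1 := by rw [hded]; simp
      have := ih (p ++ [c]) (seen.insert c ((PySem.List.dedup p).length : Int))
        (v * 11 + ((PySem.List.dedup p).length : Int)) hg'
      rw [hlen] at this
      rw [show v + (v * 10 + ((PySem.List.dedup p).length : Int))
          = v * 11 + ((PySem.List.dedup p).length : Int) by ring, this, ← hsplit]

-- B's right-to-left power loop equals the Horner fold over the original order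
theorem B_loop (order : List Char) (l : List Char) :
    ∀ (v p : Int),
      (l.foldl
        (fun (st : Int × Int) c =>
          (st.1 + (((PySem.List.index? order c).getD 0 : Nat) : Int) * st.2, st.2 * 11))
        (v, p)).1
      = v + p * (l.reverse.foldl (fun a c => a * 11 + idxI order c) 0) := by
  induction l with
  | nil => intro v p; simp
  | cons c rest ih =>
    intro v p
    simp only [List.foldl, List.reverse_cons]
    rw [ih, List.foldl_append]
    simp only [List.foldl, idxI]
    ring

-- ===== VERDICT (by name: the statement is the Claim_ definition above) =====
theorem unifiy_spec : Claim_equal_unifiy := by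
  intro s _
  show unifiy s = unifiy_alt s
  unfold unifiy unifiy_alt
  have hA := A_loop s.toList [] PySem.Dict.empty 0 (by intro c; simp [PySem.List.index?_eq_idxOf?])
  have hB := B_loop (PySem.List.dedup s.toList) s.toList.reverse 0 1
  simp only [List.reverse_reverse] at hB
  have hA' : (s.toList.foldl unifiyStep (PySem.Dict.empty, 0, 0)).2.2
      = s.toList.foldl (fun a c => a * 11 + idxI (PySem.List.dedup s.toList) c) 0 := by
    simpa using hA
  rw [hA', hB]
  ring
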